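-- pv_equiv track=rewrite | github.com/bmoretz/Daily-Coding-Problem | py/problems/hashtable/__init__.py | fewest_cuts1
-- ===== SOURCE A (Python) =====
-- from collections import defaultdict
-- from collections import defaultdict
--
-- def fewest_cuts1(wall):
--
--     cuts = defaultdict(int)
--
--     for row in wall:
--         length = 0
--         for brick in row[:-1]:
--             length += brick
--             cuts[length] += 1
--
--     return len(wall) - max(cuts.values())
-- ===== SOURCE B (Python) =====
-- def fewest_cuts1(wall):
--     # collect every interior brick-edge position of every row into one flat list
--     edges = []
--     for row in wall:
--         total = 0
--         for brick in row[:-1]: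
--             total += brick
--             edges.append(total)
--     # sort, then scan once grouping equal adjacent positions into runs
--     edges.sort()
--     run_lengths = []
--     prev = None
--     run = 0
--     for e in edges:
--         if e == prev:
--             run += 1
--         else:
--             if run:
--                 run_lengths.append(run)
--             prev = e
--             run = 1
--     if run:
--         run_lengths.append(run)
--     return len(wall) - max(run_lengths)
-- ===== Notes on version B (the rewrite author's own statement) =====
-- stated objective: alternative
-- what changed: Replaces the incremental defaultdict histogram with a flat list of all brick-edge positions that is sorted once and scanned grouping equal adjacent positions into runs; the answer is len(wall) minus the longest run.
import Mathlib
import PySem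

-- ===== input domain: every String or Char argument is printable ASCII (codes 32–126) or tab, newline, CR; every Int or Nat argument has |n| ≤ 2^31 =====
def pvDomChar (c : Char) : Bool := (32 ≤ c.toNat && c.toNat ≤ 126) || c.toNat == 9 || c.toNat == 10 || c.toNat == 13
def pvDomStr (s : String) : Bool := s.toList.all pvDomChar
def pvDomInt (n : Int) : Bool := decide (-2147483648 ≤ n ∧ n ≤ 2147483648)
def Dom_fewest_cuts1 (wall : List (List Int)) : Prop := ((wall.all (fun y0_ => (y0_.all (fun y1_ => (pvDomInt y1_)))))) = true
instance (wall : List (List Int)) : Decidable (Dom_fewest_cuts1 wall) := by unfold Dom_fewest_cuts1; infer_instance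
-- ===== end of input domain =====

-- B replaces the incremental dict histogram by a flat sorted list of edge positions scanned
-- once into runs; the answer is len(wall) minus the longest run (alternative decomposition).

-- ===== PORT A =====
def fewest_cuts1 (wall : List (List Int)) : Int :=
  let cuts : PySem.Dict Int Int := wall.foldl (fun cuts row =>
    ((PySem.List.slice row none (some (-1))).foldl
      (fun (st : PySem.Dict Int Int × Int) brick =>
        (st.1.modify (st.2 + brick) 0 (· + 1), st.2 + brick))
      (cuts, 0)).1)
    PySem.Dict.empty
  -- max(cuts.values()) raises ValueError on an empty dict; Pre_ excludes that case
  (wall.length : Int) - (PySem.List.max? cuts.values (fun v => v)).getD 0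

-- ===== PORT B =====
def fewest_cuts1_alt (wall : List (List Int)) : Int :=
  let edges : List Int := wall.foldl (fun edges row =>
    ((PySem.List.slice row none (some (-1))).foldl
      (fun (st : List Int × Int) brick =>
        (st.1 ++ [st.2 + brick], st.2 + brick))
      (edges, 0)).1) []
  let srt := PySem.List.sorted edges (fun x => x) false
  let st := srt.foldl (fun (st : List Int × Option Int × Int) e =>
      if some e = st.2.1 then (st.1, st.2.1, st.2.2 + 1)
      else ((if st.2.2 ≠ 0 then st.1 ++ [st.2.2] else st.1), some e, 1))
    ([], none, 0)
  let run_lengths := if st.2.2 ≠ 0 then st.1 ++ [st.2.2] else st.1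
  -- max(run_lengths) raises ValueError on an empty list; Pre_ excludes that case
  (wall.length : Int) - (PySem.List.max? run_lengths (fun v => v)).getD 0

-- ===== PRECONDITION & SPEC =====
-- Pre_ excludes walls with no interior brick edge (every row has at most one brick):
-- there both A's max(cuts.values()) and B's max(run_lengths) raise ValueError.
def Pre_fewest_cuts1 (wall : List (List Int)) : Prop := ∃ row ∈ wall, 2 ≤ row.length
instance (wall : List (List Int)) : Decidable (Pre_fewest_cuts1 wall) := by
  unfold Pre_fewest_cuts1; infer_instance
def pvWitness_fewest_cuts1 : List (List Int) := [[1, 2], [3]]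
def Spec_fewest_cuts1 (wall : List (List Int)) (out : Int) : Prop := out = fewest_cuts1_alt wall
instance (wall : List (List Int)) (out : Int) : Decidable (Spec_fewest_cuts1 wall out) := by
  unfold Spec_fewest_cuts1; infer_instance

-- ===== CLAIM (what is proved, stated in full; the proofs are below) =====
def Claim_equal_fewest_cuts1 : Prop := ∀ (wall : List (List Int)), Dom_fewest_cuts1 wall → Pre_fewest_cuts1 wall → Spec_fewest_cuts1 wall (fewest_cuts1 wall)

-- ===== LEMMAS AND PROOFS =====

-- prefix sums of l starting from t
def peAux (t : Int) : List Int → List Int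
  | [] => []
  | b :: l => (t + b) :: peAux (t + b) l

-- the flat list of edge positions of the whole wall
def pvEdges (wall : List (List Int)) : List Int :=
  wall.flatMap (fun row => peAux 0 row.dropLast)

-- B's scan step and finisher
def pvStep (st : List Int × Option Int × Int) (e : Int) : List Int × Option Int × Int :=
  if some e = st.2.1 then (st.1, st.2.1, st.2.2 + 1)
  else ((if st.2.2 ≠ 0 then st.1 ++ [st.2.2] else st.1), some e, 1)

def pvFinish (st : List Int × Option Int × Int) : List Int :=
  if st.2.2 ≠ 0 then st.1 ++ [st.2.2] else st.1

def pvRuns (s : List Int) : List Int :=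
  pvFinish (s.foldl pvStep ([], none, 0))

-- ---- A-side characterisation: the dict is the counter of pvEdges ----

theorem innerA : ∀ (l : List Int) (d : PySem.Dict Int Int) (t : Int),
    (l.foldl (fun (st : PySem.Dict Int Int × Int) brick =>
        (st.1.modify (st.2 + brick) 0 (· + 1), st.2 + brick)) (d, t)).1
      = (peAux t l).foldl (fun d x => d.modify x 0 (· + 1)) d := by
  intro l
  induction l with
  | nil => intro d t; rfl
  | cons b l ih => intro d t; simp [peAux, List.foldl_cons, ih]


theorem foldl_flat {α β γ : Type} (f : γ → α → γ) (g : β → List α) :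
    ∀ (w : List β) (d : γ),
      w.foldl (fun d row => (g row).foldl f d) d = (w.flatMap g).foldl f d := by
  intro w
  induction w with
  | nil => intro d; rfl
  | cons r w ih => intro d; simp [List.foldl_cons, ih, List.foldl_append]

theorem foldl_appendflat {α β : Type} (g : β → List α) :
    ∀ (w : List β) (acc : List α),
      w.foldl (fun e row => e ++ g row) acc = acc ++ w.flatMap g := by
  intro w
  induction w with
  | nil => intro acc; simp
  | cons r w ih => intro acc; simp [List.foldl_cons, ih]

theorem outerA : ∀ (wall : List (List Int)) (d : PySem.Dict Int Int),
    wall.foldl (fun cuts row =>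
        ((PySem.List.slice row none (some (-1))).foldl
          (fun (st : PySem.Dict Int Int × Int) brick =>
            (st.1.modify (st.2 + brick) 0 (· + 1), st.2 + brick))
          (cuts, 0)).1) d
      = (pvEdges wall).foldl (fun d x => d.modify x 0 (· + 1)) d := by
  intro wall d
  simp only [PySem.List.slice_to_neg_one, innerA]
  exact foldl_flat _ _ wall d

-- ---- B-side: the edges list built by B is pvEdges ----

theorem innerB : ∀ (l : List Int) (acc : List Int) (t : Int),
    (l.foldl (fun (st : List Int × Int) brick =>
        (st.1 ++ [st.2 + brick], st.2 + brick)) (acc, t)).1 = acc ++ peAux t l := by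
  intro l
  induction l with
  | nil => intro acc t; simp [peAux]
  | cons b l ih => intro acc t; simp [peAux, List.foldl_cons, ih]


theorem outerB : ∀ (wall : List (List Int)) (acc : List Int),
    wall.foldl (fun edges row =>
        ((PySem.List.slice row none (some (-1))).foldl
          (fun (st : List Int × Int) brick =>
            (st.1 ++ [st.2 + brick], st.2 + brick))
          (edges, 0)).1) acc = acc ++ pvEdges wall := by
  intro wall acc
  simp only [PySem.List.slice_to_neg_one, innerB]
  exact foldl_appendflat _ wall acc

-- ---- scan lemmas ----

theorem finish_append (rl X : List Int) (p : Option Int) (c : Int) :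
    pvFinish (rl ++ X, p, c) = rl ++ pvFinish (X, p, c) := by
  unfold pvFinish
  by_cases h : c ≠ 0 <;> simp [h]


theorem scan_prefix : ∀ (t : List Int) (rl : List Int) (p : Option Int) (r : Int),
    t.foldl pvStep (rl, p, r)
      = (rl ++ (t.foldl pvStep ([], p, r)).1, (t.foldl pvStep ([], p, r)).2) := by
  intro t
  induction t with
  | nil => intro rl p r; simp
  | cons e t ih =>
    intro rl p r
    rw [List.foldl_cons, List.foldl_cons]
    by_cases h : some e = p
    · have hs : ∀ rl' : List Int, pvStep (rl', p, r) e = (rl', p, r + 1) := by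
        intro rl'; simp [pvStep, h]
      rw [hs, hs, ih rl, ih ([] : List Int)]
    · by_cases hr : r ≠ 0
      · have hs : ∀ rl' : List Int, pvStep (rl', p, r) e = (rl' ++ [r], some e, 1) := by
          intro rl'; simp [pvStep, h, hr]
        rw [hs, hs, ih (rl ++ [r]), ih (([] : List Int) ++ [r])]
        simp [List.append_assoc]
      · have hs : ∀ rl' : List Int, pvStep (rl', p, r) e = (rl', some e, 1) := by
          intro rl'; simp [pvStep, h, hr]
        rw [hs, hs, ih rl, ih ([] : List Int)]

theorem scan_block : ∀ (n : Nat) (a : Int) (m : Int),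
    (List.replicate n a).foldl pvStep ([], some a, m) = ([], some a, m + n) := by
  intro n
  induction n with
  | zero => intro a m; simp
  | succ k ih =>
    intro a m
    rw [List.replicate_succ, List.foldl_cons]
    have hs : pvStep (([] : List Int), some a, m) a = ([], some a, m + 1) := by
      simp [pvStep]
    rw [hs, ih]
    simp only [Prod.mk.injEq, true_and]
    push_cast
    ring

theorem scan_restart : ∀ (t : List Int) (a : Int) (r : Int), r ≠ 0 → a ∉ t →
    pvFinish (t.foldl pvStep ([], some a, r)) = r :: pvRuns t := by
  intro t a r hr ha
  cases t with
  | nil => simp [pvRuns, pvFinish, hr]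
  | cons b t' =>
    simp only [List.mem_cons, not_or] at ha
    obtain ⟨hab, hat⟩ := ha
    have hba : ¬ (some b = some a) := by simpa using fun h => hab h.symm
    have h1 : pvStep (([] : List Int), some a, r) b = ([r], some b, 1) := by
      simp [pvStep, hba, hr]
    have h0 : pvStep (([] : List Int), none, 0) b = ([], some b, 1) := by
      simp [pvStep]
    rw [List.foldl_cons, h1, scan_prefix, pvRuns, List.foldl_cons, h0]
    rcases hst : (t'.foldl pvStep ([], some b, 1)) with ⟨X, p, c⟩
    exact finish_append [r] X p c

theorem runs_cons_block (a : Int) (n : Nat) (t : List Int) (hn : 1 ≤ n) (ha : a ∉ t) :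
    pvRuns (List.replicate n a ++ t) = (n : Int) :: pvRuns t := by
  obtain ⟨m, rfl⟩ : ∃ m, n = m + 1 := ⟨n - 1, by omega⟩
  have h0 : pvStep (([] : List Int), none, 0) a = ([], some a, 1) := by
    simp [pvStep]
  have hL : pvRuns (List.replicate (m + 1) a ++ t)
      = pvFinish (t.foldl pvStep ([], some a, 1 + (m : Int))) := by
    rw [pvRuns, List.foldl_append, List.replicate_succ, List.foldl_cons, h0, scan_block]
  have hne : (1 + (m : Int)) ≠ 0 := by omega
  rw [hL, scan_restart t a _ hne ha]
  congr 1
  push_cast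
  ring

-- ---- decomposition of a sorted list ----

theorem sorted_decomp : ∀ (s : List Int), s.Pairwise (· ≤ ·) → s ≠ [] →
    ∃ a n t, s = List.replicate n a ++ t ∧ 1 ≤ n ∧ a ∉ t ∧ t.Pairwise (· ≤ ·) := by
  intro s
  induction s with
  | nil => intro _ h; exact absurd rfl h
  | cons a rest ih =>
    intro hp _
    rw [List.pairwise_cons] at hp
    obtain ⟨h1, h2⟩ := hp
    cases hrest : rest with
    | nil =>
      exact ⟨a, 1, [], by simp, le_refl 1, by simp, List.Pairwise.nil⟩
    | cons b r' =>
      subst hrest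
      by_cases hab : a = b
      · obtain ⟨a', n, t, heq, hn, hnot, hpt⟩ := ih h2 (by simp)
        obtain ⟨m, rfl⟩ : ∃ m, n = m + 1 := ⟨n - 1, by omega⟩
        rw [List.replicate_succ] at heq
        subst hab
        injection heq with hb hr
        subst hb
        refine ⟨a, m + 2, t, ?_, by omega, hnot, hpt⟩
        show a :: a :: r' = List.replicate (m + 2) a ++ t
        rw [hr]
        simp [List.replicate_succ]
      · refine ⟨a, 1, b :: r', by simp, le_refl 1, ?_, h2⟩
        intro hmem
        rcases List.mem_cons.mp hmem with h | h
        · exact hab h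
        · have hba : b ≤ a := by
            rw [List.pairwise_cons] at h2
            exact h2.1 a h
          have hab' : a ≤ b := h1 b (List.mem_cons_self)
          exact hab (le_antisymm hab' hba)

-- ---- runs of a sorted list = counts over its distinct values ----

theorem runs_spec : ∀ (N : Nat) (s : List Int), s.length ≤ N → s.Pairwise (· ≤ ·) →
    ∃ d : List Int, d.Nodup ∧ (∀ x, x ∈ d ↔ x ∈ s) ∧
      pvRuns s = d.map (fun k => (s.count k : Int)) := by
  intro N
  induction N with
  | zero =>
    intro s hl _
    have hs : s = [] := List.eq_nil_of_length_eq_zero (Nat.le_zero.mp hl)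
    subst hs
    exact ⟨[], List.nodup_nil, by simp, by simp [pvRuns, pvFinish]⟩
  | succ N ih =>
    intro s hl hp
    by_cases hnil : s = []
    · subst hnil
      exact ⟨[], List.nodup_nil, by simp, by simp [pvRuns, pvFinish]⟩
    · obtain ⟨a, n, t, heq, hn, hnot, hpt⟩ := sorted_decomp s hp hnil
      subst heq
      have hlt : t.length ≤ N := by
        simp only [List.length_append, List.length_replicate] at hl
        omega
      obtain ⟨d', hnd, hmem, hruns⟩ := ih t hlt hpt
      have hand : a ∉ d' := fun h => hnot ((hmem a).mp h)
      refine ⟨a :: d', List.nodup_cons.mpr ⟨hand, hnd⟩, ?_, ?_⟩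
      · intro x
        simp only [List.mem_cons, List.mem_append, List.mem_replicate, hmem x]
        constructor
        · rintro (rfl | h)
          · exact Or.inl ⟨by omega, rfl⟩
          · exact Or.inr h
        · rintro (⟨_, rfl⟩ | h)
          · exact Or.inl rfl
          · exact Or.inr h
      · rw [runs_cons_block a n t hn hnot, hruns, List.map_cons]
        congr 1
        · have : (List.replicate n a ++ t).count a = n := by
            rw [List.count_append, List.count_replicate_self,
              List.count_eq_zero.mpr hnot, Nat.add_zero]
          rw [this]
        · refine List.map_congr_left ?_
          intro k hk
          have hkt : k ∈ t := (hmem k).mp hk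
          have hka : k ≠ a := fun h => hnot (h ▸ hkt)
          have hak : ¬ (a = k) := fun h => hka h.symm
          have : (List.replicate n a ++ t).count k = t.count k := by
            simp [List.count_append, List.count_replicate, hak]
          rw [this]

-- ---- max? is invariant under permutation (identity key) ----

theorem max?_id_perm {xs ys : List Int} (h : xs.Perm ys) :
    PySem.List.max? xs (fun v => v) = PySem.List.max? ys (fun v => v) := by
  cases hx : PySem.List.max? xs (fun v => v) with
  | none =>
    have hxs : xs = [] := (PySem.List.max?_eq_none_iff _ _).mp hx
    subst hxs
    have hys : ys = [] := h.symm.eq_nil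
    subst hys
    rfl
  | some a =>
    cases hy : PySem.List.max? ys (fun v => v) with
    | none =>
      have hys : ys = [] := (PySem.List.max?_eq_none_iff _ _).mp hy
      subst hys
      have hxs : xs = [] := h.eq_nil
      subst hxs
      simp [PySem.List.max?] at hx
    | some b =>
      have hax : a ∈ xs := PySem.List.max?_mem hx
      have hby : b ∈ ys := PySem.List.max?_mem hy
      have h1 : a ≤ b := PySem.List.max?_isMax hy a (h.subset hax)
      have h2 : b ≤ a := PySem.List.max?_isMax hx b (h.symm.subset hby)
      rw [le_antisymm h1 h2]

-- ---- bridging the ports to the characterisations ----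

theorem A_eq (wall : List (List Int)) :
    fewest_cuts1 wall = (wall.length : Int) -
      (PySem.List.max? ((PySem.Set.ofList (pvEdges wall)).map
        (fun k => ((pvEdges wall).count k : Int))) (fun v => v)).getD 0 := by
  unfold fewest_cuts1
  rw [outerA]
  have hc : (pvEdges wall).foldl (fun d x => d.modify x 0 (· + 1)) PySem.Dict.empty
      = PySem.Dict.counter (pvEdges wall) := by
    rw [PySem.Dict.counter_eq_foldl]
  rw [hc]
  have hv : (PySem.Dict.counter (pvEdges wall)).values
      = (PySem.Set.ofList (pvEdges wall)).map (fun k => ((pvEdges wall).count k : Int)) := by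
    show (PySem.Dict.counter (pvEdges wall)).items.map (·.2) = _
    rw [PySem.Dict.items_counter, List.map_map]
    rfl
  show (wall.length : Int) - (PySem.List.max?
      (PySem.Dict.counter (pvEdges wall)).values (fun v => v)).getD 0 = _
  rw [hv]

theorem B_eq (wall : List (List Int)) :
    fewest_cuts1_alt wall = (wall.length : Int) -
      (PySem.List.max? (pvRuns (PySem.List.sorted (pvEdges wall) (fun x => x) false))
        (fun v => v)).getD 0 := by
  unfold fewest_cuts1_alt
  rw [outerB]
  rfl

-- ===== VERDICT (by name: the statement is the Claim_ definition above) =====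
theorem fewest_cuts1_spec : Claim_equal_fewest_cuts1 := by
  intro wall _ _
  unfold Spec_fewest_cuts1
  rw [A_eq, B_eq]
  congr 2
  obtain ⟨d, hnd, hmem, hruns⟩ :=
    runs_spec (PySem.List.sorted (pvEdges wall) (fun x => x) false).length
      (PySem.List.sorted (pvEdges wall) (fun x => x) false) le_rfl
      (PySem.List.sorted_pairwise (pvEdges wall) (fun x => x))
  have hperm : (PySem.List.sorted (pvEdges wall) (fun x => x) false).Perm (pvEdges wall) :=
    PySem.List.sorted_perm _ _ _
  rw [hruns]
  have hcnt : d.map (fun k => ((PySem.List.sorted (pvEdges wall) (fun x => x) false).count k : Int))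
      = d.map (fun k => ((pvEdges wall).count k : Int)) := by
    refine List.map_congr_left ?_
    intro k _
    rw [hperm.count_eq]
  rw [hcnt]
  have hdperm : d.Perm (PySem.Set.ofList (pvEdges wall)) := by
    rw [List.perm_ext_iff_of_nodup hnd (PySem.Set.nodup_ofList _)]
    intro x
    rw [hmem x, PySem.Set.mem_ofList, PySem.List.mem_sorted]
  exact (max?_id_perm ((hdperm.map _).symm))
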